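-- pv_equiv track=rewrite | github.com/bmlsj/algorithm | 프로그래머스/lv0/120866. 안전지대/안전지대.py | solution
-- ===== SOURCE A (Python) =====
-- def check(board, i, j):
--     if 0 <= i < len(board) and 0 <= j < len(board):
--         board[i][j] = 1
--     return board
--
-- def solution(board):
--
--     map = []
--     for i in range(len(board)):
--         for j in range(len(board)):
--             if board[i][j] == 1:
--                 map.append((i, j))
--
--     for i, j in map:
--         check(board, i, j+1)
--         check(board, i, j-1)
--         check(board, i-1, j)
--         check(board, i-1, j+1)
--         check(board, i-1, j-1)
--         check(board, i+1, j+1)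
--         check(board, i+1, j)
--         check(board, i+1, j-1)
--
--     cnt = 0
--     for i in range(len(board)):
--         for j in range(len(board)):
--             if board[i][j] == 1:
--                 cnt += 1
--
--     return (len(board)*len(board)) - cnt
-- ===== SOURCE B (Python) =====
-- def solution(board):
--     n = len(board)
--     cnt = 0
--     for i in range(n):
--         for j in range(n):
--             safe = True
--             for di in (-1, 0, 1):
--                 for dj in (-1, 0, 1):
--                     a, b = i + di, j + dj
--                     if 0 <= a < n and 0 <= b < n and board[a][b] == 1:
--                         safe = False
--             if safe:
--                 cnt += 1
--     return cnt
-- ===== Notes on version B (the rewrite author's own statement) =====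
-- stated objective: alternative
-- what changed: Replaces A's mutate-and-scatter pass (collect a mine list, mark each mine's 8 neighbors in place, recount 1s, subtract from n*n) with a single read-only gather pass that directly counts a cell as safe when no cell of its in-range 3x3 neighborhood equals 1.
import Mathlib
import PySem

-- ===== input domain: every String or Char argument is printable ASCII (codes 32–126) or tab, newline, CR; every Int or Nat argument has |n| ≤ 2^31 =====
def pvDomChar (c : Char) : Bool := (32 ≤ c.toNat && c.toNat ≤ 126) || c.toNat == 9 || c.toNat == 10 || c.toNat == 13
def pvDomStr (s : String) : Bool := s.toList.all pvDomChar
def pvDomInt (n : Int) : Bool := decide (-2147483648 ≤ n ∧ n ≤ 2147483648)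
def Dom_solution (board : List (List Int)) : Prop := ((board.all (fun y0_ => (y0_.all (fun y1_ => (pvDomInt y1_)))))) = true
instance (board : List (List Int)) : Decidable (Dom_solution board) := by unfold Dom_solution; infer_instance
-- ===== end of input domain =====

-- B replaces A's mutate-and-scatter pass (collect mines, mark neighbors in place, recount)
-- with a single read-only gather pass counting cells whose in-range 3x3 neighborhood has no 1.
-- NOTE: Python A mutates `board` in place; B leaves it unchanged — the equivalence proved
-- here is about the RETURN value only.

-- ===== PORT A =====
-- board[i][j] read (indices known in range under Pre_solution): exact via getD there
def pvVal (b : List (List Int)) (i j : Nat) : Int := (b.getD i []).getD j 0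

-- Python `check`: guarded in-place write board[i][j] = 1
def pvCheck (b : List (List Int)) (i j : Int) : List (List Int) :=
  if 0 ≤ i ∧ i < (b.length : Int) ∧ 0 ≤ j ∧ j < (b.length : Int) then
    b.set i.toNat ((b.getD i.toNat []).set j.toNat 1)
  else b

-- the eight `check` calls of A's second loop, in A's order
def pvMark (b : List (List Int)) (m : Nat × Nat) : List (List Int) :=
  let i : Int := m.1
  let j : Int := m.2
  let b := pvCheck b i (j+1)
  let b := pvCheck b i (j-1)
  let b := pvCheck b (i-1) j
  let b := pvCheck b (i-1) (j+1)
  let b := pvCheck b (i-1) (j-1)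
  let b := pvCheck b (i+1) (j+1)
  let b := pvCheck b (i+1) j
  let b := pvCheck b (i+1) (j-1)
  b

def solution (board : List (List Int)) : Int :=
  let n := board.length
  let mines := (List.range n).foldl (fun acc i =>
    (List.range n).foldl (fun acc j =>
      if pvVal board i j = 1 then acc ++ [(i, j)] else acc) acc) ([] : List (Nat × Nat))
  let board2 := mines.foldl pvMark board
  let cnt := (List.range n).foldl (fun c i =>
    (List.range n).foldl (fun c j =>
      if pvVal board2 i j = 1 then c + 1 else c) c) (0 : Int)
  (n : Int) * n - cnt

-- ===== PORT B =====
def solution_alt (board : List (List Int)) : Int :=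
  let n := board.length
  (List.range n).foldl (fun cnt (i : Nat) =>
    (List.range n).foldl (fun cnt (j : Nat) =>
      let safe := ([-1, 0, 1] : List Int).foldl (fun safe di =>
        ([-1, 0, 1] : List Int).foldl (fun safe dj =>
          let a := (i : Int) + di
          let b := (j : Int) + dj
          if 0 ≤ a ∧ a < (n : Int) ∧ 0 ≤ b ∧ b < (n : Int) ∧ pvVal board a.toNat b.toNat = 1
          then false else safe) safe) true
      if safe then cnt + 1 else cnt) cnt) 0

-- ===== PRECONDITION & SPEC =====
-- Python A indexes board[i][j] for all i, j < len(board): a row shorter than the board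
-- raises IndexError; exactly those ragged boards are excluded.
def Pre_solution (board : List (List Int)) : Prop :=
  ∀ r ∈ board, board.length ≤ r.length
instance (board : List (List Int)) : Decidable (Pre_solution board) := by unfold Pre_solution; infer_instance

def pvWitness_solution : List (List Int) := [[0, 1], [0, 0]]

def Spec_solution (board : List (List Int)) (out : Int) : Prop := out = solution_alt board
instance (board : List (List Int)) (out : Int) : Decidable (Spec_solution board out) := by unfold Spec_solution; infer_instance

-- ===== CLAIM (what is proved, stated in full; the proofs are below) =====
def Claim_equal_solution : Prop := ∀ (board : List (List Int)), Dom_solution board → Pre_solution board → Spec_solution board (solution board)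

-- ===== LEMMAS AND PROOFS =====

-- row-shape invariant maintained through A's mutation
def RowsOK (b : List (List Int)) (n : Nat) : Prop :=
  b.length = n ∧ ∀ r ∈ b, n ≤ r.length

-- (p,q) is one of the 8 neighbours of (a,c)
abbrev NearNE (a c p q : Nat) : Prop :=
  ¬(a = p ∧ c = q) ∧ (a : Int) ≤ (p : Int) + 1 ∧ (p : Int) ≤ (a : Int) + 1 ∧
    (c : Int) ≤ (q : Int) + 1 ∧ (q : Int) ≤ (c : Int) + 1

-- cell (i,j) has a 1 in its in-range 3x3 neighbourhood
abbrev Danger (board : List (List Int)) (n : Nat) (i j : Nat) : Prop :=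
  ∃ di ∈ ([-1, 0, 1] : List Int), ∃ dj ∈ ([-1, 0, 1] : List Int),
    0 ≤ (i : Int) + di ∧ (i : Int) + di < (n : Int) ∧ 0 ≤ (j : Int) + dj ∧ (j : Int) + dj < (n : Int) ∧
      pvVal board ((i : Int) + di).toNat ((j : Int) + dj).toNat = 1

-- generic fold lemmas
lemma getD_set_eq {α : Type} : ∀ (l : List α) (i : Nat) (a d : α), i < l.length → (l.set i a).getD i d = a := by
  intro l
  induction l with
  | nil => intro i a d h; simp at h
  | cons x t ih =>
    intro i a d h
    cases i with
    | zero => simp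
    | succ i => simpa using ih i a d (by simpa using h)

lemma getD_set_ne {α : Type} : ∀ (l : List α) (i k : Nat) (a d : α), i ≠ k → (l.set i a).getD k d = l.getD k d := by
  intro l
  induction l with
  | nil => intros; simp
  | cons x t ih =>
    intro i k a d hne
    cases i with
    | zero => cases k with
      | zero => omega
      | succ k => simp
    | succ i => cases k with
      | zero => simp
      | succ k => simpa using ih i k a d (by omega)

lemma foldl_if_push {α : Type} (p : α → Prop) [DecidablePred p] :
    ∀ (l : List α) (s : Bool), l.foldl (fun s x => if p x then false else s) s = (s && decide (∀ x ∈ l, ¬ p x)) := by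
  intro l
  induction l with
  | nil => simp
  | cons x t ih =>
    intro s
    rw [List.foldl_cons, ih]
    by_cases hx : p x <;> simp [hx]

lemma foldl_and {α : Type} (c : α → Bool) :
    ∀ (l : List α) (s : Bool), l.foldl (fun s x => s && c x) s = (s && l.all c) := by
  intro l
  induction l with
  | nil => simp
  | cons x t ih => intro s; simp [List.foldl_cons, ih, Bool.and_assoc]

lemma foldl_count {α : Type} (p : α → Prop) [DecidablePred p] :
    ∀ (l : List α) (c : Int), l.foldl (fun c x => if p x then c + 1 else c) c
      = c + (l.map (fun x => if p x then (1 : Int) else 0)).sum := by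
  intro l
  induction l with
  | nil => simp
  | cons x t ih =>
    intro c
    by_cases hx : p x <;> simp [List.foldl_cons, hx, ih] <;> ring

lemma foldl_addg {α : Type} (g : α → Int) :
    ∀ (l : List α) (c : Int), l.foldl (fun c x => c + g x) c = c + (l.map g).sum := by
  intro l
  induction l with
  | nil => simp
  | cons x t ih => intro c; simp [List.foldl_cons, ih]; ring

lemma double_count (p : Nat → Nat → Prop) [inst : ∀ i j, Decidable (p i j)] (n : Nat) :
    (List.range n).foldl (fun c i => (List.range n).foldl (fun c j => if p i j then c + 1 else c) c) (0 : Int)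
      = ((List.range n).map (fun i => ((List.range n).map (fun j => if p i j then (1 : Int) else 0)).sum)).sum := by
  have h1 : (fun (c : Int) (i : Nat) => (List.range n).foldl (fun c j => if p i j then c + 1 else c) c)
      = fun (c : Int) (i : Nat) => c + ((List.range n).map (fun j => if p i j then (1 : Int) else 0)).sum := by
    funext c i
    exact foldl_count (p i) (List.range n) c
  rw [h1, foldl_addg (fun i => ((List.range n).map (fun j => if p i j then (1 : Int) else 0)).sum) (List.range n) 0]
  simp

lemma foldl_app {α β : Type} (p : α → Prop) [DecidablePred p] (f : α → β) :
    ∀ (l : List α) (acc : List β), l.foldl (fun a x => if p x then a ++ [f x] else a) acc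
      = acc ++ (l.filter (fun x => decide (p x))).map f := by
  intro l
  induction l with
  | nil => simp
  | cons x t ih =>
    intro acc
    by_cases hx : p x <;> simp [List.foldl_cons, hx, ih]

lemma foldl_appT {α β : Type} (T : α → List β) :
    ∀ (l : List α) (acc : List β), l.foldl (fun a x => a ++ T x) acc = acc ++ l.flatMap T := by
  intro l
  induction l with
  | nil => simp
  | cons x t ih => intro acc; simp [List.foldl_cons, ih]

lemma sum_pairs (c : Int) (f g : Nat → Int) :
    ∀ (l : List Nat), (∀ x ∈ l, f x + g x = c) → (l.map f).sum + (l.map g).sum = (l.length : Int) * c := by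
  intro l
  induction l with
  | nil => simp
  | cons x t ih =>
    intro h
    have hx := h x (by simp)
    have ht := ih (fun y hy => h y (by simp [hy]))
    simp only [List.map_cons, List.sum_cons, List.length_cons]
    push_cast
    linarith

lemma final_arith (x y n2 : Int) (h : x + y = n2) : n2 - x = y := by omega

-- A-side: pvCheck
lemma rows_check {b : List (List Int)} {n : Nat} (h : RowsOK b n) (i j : Int) : RowsOK (pvCheck b i j) n := by
  unfold pvCheck
  split_ifs with hc
  · obtain ⟨hlen, hrows⟩ := h
    refine ⟨by simpa using hlen, ?_⟩
    intro r hr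
    rcases List.mem_or_eq_of_mem_set hr with hr' | rfl
    · exact hrows r hr'
    · rw [List.length_set]
      apply hrows
      have hi : i.toNat < b.length := by omega
      rw [List.getD_eq_getElem _ _ hi]
      exact List.getElem_mem hi
  · exact h

lemma rows_mark {b : List (List Int)} {n : Nat} (h : RowsOK b n) (m : Nat × Nat) : RowsOK (pvMark b m) n := by
  unfold pvMark
  exact rows_check (rows_check (rows_check (rows_check (rows_check (rows_check (rows_check (rows_check h _ _) _ _) _ _) _ _) _ _) _ _) _ _) _ _

lemma val_check {b : List (List Int)} {n : Nat} (h : RowsOK b n) {p q : Nat} (hp : p < n) (hq : q < n) (i j : Int) :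
    pvVal (pvCheck b i j) p q = if i = (p : Int) ∧ j = (q : Int) then 1 else pvVal b p q := by
  obtain ⟨hlen, hrows⟩ := h
  unfold pvCheck pvVal
  by_cases hc : 0 ≤ i ∧ i < (b.length : Int) ∧ 0 ≤ j ∧ j < (b.length : Int)
  · rw [if_pos hc]
    by_cases hip : i.toNat = p
    · by_cases hjq : j.toNat = q
      · rw [if_pos (by omega)]
        have hpb : p < b.length := by omega
        rw [← hip, getD_set_eq _ _ _ _ (by omega)]
        have hrow : n ≤ (b.getD i.toNat []).length := by
          apply hrows
          rw [List.getD_eq_getElem _ _ (by omega : i.toNat < b.length)]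
          exact List.getElem_mem _
        rw [← hjq, getD_set_eq _ _ _ _ (by omega)]
      · rw [if_neg (by omega), ← hip, getD_set_eq _ _ _ _ (by omega),
          getD_set_ne _ _ _ _ _ hjq]
    · rw [if_neg (by omega), getD_set_ne _ _ _ _ _ hip]
  · rw [if_neg hc, if_neg (by omega)]

lemma val_mark {b : List (List Int)} {n : Nat} (h : RowsOK b n) {p q : Nat} (hp : p < n) (hq : q < n) (m : Nat × Nat) :
    pvVal (pvMark b m) p q = if NearNE m.1 m.2 p q then 1 else pvVal b p q := by
  unfold pvMark
  have r1 := rows_check h (m.1 : Int) ((m.2 : Int) + 1)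
  have r2 := rows_check r1 (m.1 : Int) ((m.2 : Int) - 1)
  have r3 := rows_check r2 ((m.1 : Int) - 1) (m.2 : Int)
  have r4 := rows_check r3 ((m.1 : Int) - 1) ((m.2 : Int) + 1)
  have r5 := rows_check r4 ((m.1 : Int) - 1) ((m.2 : Int) - 1)
  have r6 := rows_check r5 ((m.1 : Int) + 1) ((m.2 : Int) + 1)
  have r7 := rows_check r6 ((m.1 : Int) + 1) (m.2 : Int)
  rw [val_check r7 hp hq, val_check r6 hp hq, val_check r5 hp hq, val_check r4 hp hq,
    val_check r3 hp hq, val_check r2 hp hq, val_check r1 hp hq, val_check h hp hq]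
  split_ifs <;> first | rfl | (exfalso; omega)

lemma val_fold {n : Nat} : ∀ (ms : List (Nat × Nat)) (b : List (List Int)), RowsOK b n →
    ∀ p q : Nat, p < n → q < n →
    pvVal (ms.foldl pvMark b) p q = if (∃ m ∈ ms, NearNE m.1 m.2 p q) then 1 else pvVal b p q := by
  intro ms
  induction ms with
  | nil => intro b hb p q hp hq; simp
  | cons m ms ih =>
    intro b hb p q hp hq
    rw [List.foldl_cons, ih (pvMark b m) (rows_mark hb m) p q hp hq, val_mark hb hp hq]
    by_cases hnear : NearNE m.1 m.2 p q
    · have hc : ∃ m1 ∈ m :: ms, NearNE m1.1 m1.2 p q := ⟨m, by simp, hnear⟩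
      rw [if_pos hc, if_pos hnear, ite_self]
    · have hiff : (∃ m1 ∈ m :: ms, NearNE m1.1 m1.2 p q) ↔ ∃ m1 ∈ ms, NearNE m1.1 m1.2 p q := by
        constructor
        · rintro ⟨x, hx, hn⟩
          rcases List.mem_cons.mp hx with rfl | hx'
          · exact absurd hn hnear
          · exact ⟨x, hx', hn⟩
        · rintro ⟨x, hx, hn⟩
          exact ⟨x, List.mem_cons_of_mem _ hx, hn⟩
      rw [if_neg hnear]
      by_cases hex : ∃ m1 ∈ ms, NearNE m1.1 m1.2 p q
      · rw [if_pos hex, if_pos (hiff.mpr hex)]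
      · rw [if_neg hex, if_neg (fun h => hex (hiff.mp h))]

lemma mem_mines (board : List (List Int)) (m : Nat × Nat) :
    m ∈ ((List.range board.length).foldl (fun acc i =>
      (List.range board.length).foldl (fun acc j =>
        if pvVal board i j = 1 then acc ++ [(i, j)] else acc) acc) ([] : List (Nat × Nat)))
    ↔ m.1 < board.length ∧ m.2 < board.length ∧ pvVal board m.1 m.2 = 1 := by
  simp only [foldl_app, foldl_appT, List.nil_append, List.mem_flatMap,
    List.mem_map, List.mem_filter, List.mem_range, decide_eq_true_eq]
  constructor
  · rintro ⟨i, hi, j, ⟨hj, hv⟩, rfl⟩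
    exact ⟨hi, hj, hv⟩
  · rintro ⟨h1, h2, h3⟩
    exact ⟨m.1, h1, m.2, ⟨h2, h3⟩, rfl⟩

lemma marked_iff (board : List (List Int)) (hpre : Pre_solution board) {p q : Nat}
    (hp : p < board.length) (hq : q < board.length) :
    pvVal (((List.range board.length).foldl (fun acc i =>
      (List.range board.length).foldl (fun acc j =>
        if pvVal board i j = 1 then acc ++ [(i, j)] else acc) acc) ([] : List (Nat × Nat))).foldl pvMark board) p q = 1
    ↔ Danger board board.length p q := by
  have hrows : RowsOK board board.length := ⟨rfl, hpre⟩
  rw [val_fold _ board hrows p q hp hq]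
  by_cases hex : ∃ m ∈ ((List.range board.length).foldl (fun acc i =>
      (List.range board.length).foldl (fun acc j =>
        if pvVal board i j = 1 then acc ++ [(i, j)] else acc) acc) ([] : List (Nat × Nat))), NearNE m.1 m.2 p q
  · rw [if_pos hex]
    obtain ⟨m, hm, hnear⟩ := hex
    rw [mem_mines] at hm
    obtain ⟨ha, hc, hv⟩ := hm
    obtain ⟨hne, b1, b2, b3, b4⟩ := hnear
    constructor
    · intro _
      refine ⟨(m.1 : Int) - (p : Int), by simp; omega, (m.2 : Int) - (q : Int), by simp; omega,
        by omega, by omega, by omega, by omega, ?_⟩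
      have e1 : ((p : Int) + ((m.1 : Int) - (p : Int))).toNat = m.1 := by omega
      have e2 : ((q : Int) + ((m.2 : Int) - (q : Int))).toNat = m.2 := by omega
      rw [e1, e2]; exact hv
    · intro _; rfl
  · rw [if_neg hex]
    constructor
    · intro hv
      refine ⟨0, by simp, 0, by simp, by omega, by omega, by omega, by omega, ?_⟩
      have e1 : ((p : Int) + 0).toNat = p := by omega
      have e2 : ((q : Int) + 0).toNat = q := by omega
      rw [e1, e2]; exact hv
    · rintro ⟨di, hdi, dj, hdj, h1, h2, h3, h4, hv⟩
      by_cases hself : di = 0 ∧ dj = 0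
      · obtain ⟨rfl, rfl⟩ := hself
        have e1 : ((p : Int) + 0).toNat = p := by omega
        have e2 : ((q : Int) + 0).toNat = q := by omega
        rw [e1, e2] at hv; exact hv
      · exfalso
        have hdi' : di = -1 ∨ di = 0 ∨ di = 1 := by simpa using hdi
        have hdj' : dj = -1 ∨ dj = 0 ∨ dj = 1 := by simpa using hdj
        apply hex
        refine ⟨(((p : Int) + di).toNat, ((q : Int) + dj).toNat), ?_, ?_⟩
        · rw [mem_mines]
          exact ⟨by omega, by omega, hv⟩
        · refine ⟨?_, by omega, by omega, by omega, by omega⟩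
          rintro ⟨e1, e2⟩
          exact hself ⟨by omega, by omega⟩

lemma safe_iff (board : List (List Int)) (n i j : Nat) :
    (([-1, 0, 1] : List Int).foldl (fun safe di =>
      ([-1, 0, 1] : List Int).foldl (fun safe dj =>
        if 0 ≤ (i : Int) + di ∧ (i : Int) + di < (n : Int) ∧ 0 ≤ (j : Int) + dj ∧ (j : Int) + dj < (n : Int) ∧
            pvVal board ((i : Int) + di).toNat ((j : Int) + dj).toNat = 1
        then false else safe) safe) true) = true
    ↔ ¬ Danger board n i j := by
  simp only [foldl_if_push, foldl_and, Bool.true_and, List.all_eq_true, decide_eq_true_eq]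
  constructor
  · intro h
    rintro ⟨di, hdi, dj, hdj, hcond⟩
    exact h di hdi dj hdj ⟨hcond.1, hcond.2.1, hcond.2.2.1, hcond.2.2.2.1, hcond.2.2.2.2⟩
  · intro h di hdi dj hdj hcond
    exact h ⟨di, hdi, dj, hdj, hcond⟩

-- ===== VERDICT (by name: the statement is the Claim_ definition above) =====
theorem solution_spec : Claim_equal_solution := by
  intro board _ hpre
  simp only [Spec_solution, solution, solution_alt]
  rw [double_count (fun i j => pvVal (((List.range board.length).foldl (fun acc i =>
        (List.range board.length).foldl (fun acc j =>
          if pvVal board i j = 1 then acc ++ [(i, j)] else acc) acc) ([] : List (Nat × Nat))).foldl pvMark board) i j = 1) board.length,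
      double_count (fun i j => (([-1, 0, 1] : List Int).foldl (fun safe di =>
        ([-1, 0, 1] : List Int).foldl (fun safe dj =>
          if 0 ≤ (i : Int) + di ∧ (i : Int) + di < (board.length : Int) ∧ 0 ≤ (j : Int) + dj ∧ (j : Int) + dj < (board.length : Int) ∧
              pvVal board ((i : Int) + di).toNat ((j : Int) + dj).toNat = 1
          then false else safe) safe) true) = true) board.length]
  refine final_arith _ _ _ ?_
  rw [show ((board.length : Int) * board.length) = ((List.range board.length).length : Int) * (board.length : Int) by simp]
  apply sum_pairs
  intro i hi
  rw [List.mem_range] at hi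
  have inner := sum_pairs (1 : Int)
    (fun j => if pvVal (((List.range board.length).foldl (fun acc i =>
        (List.range board.length).foldl (fun acc j =>
          if pvVal board i j = 1 then acc ++ [(i, j)] else acc) acc) ([] : List (Nat × Nat))).foldl pvMark board) i j = 1 then (1 : Int) else 0)
    (fun j => if (([-1, 0, 1] : List Int).foldl (fun safe di =>
        ([-1, 0, 1] : List Int).foldl (fun safe dj =>
          if 0 ≤ (i : Int) + di ∧ (i : Int) + di < (board.length : Int) ∧ 0 ≤ (j : Int) + dj ∧ (j : Int) + dj < (board.length : Int) ∧
              pvVal board ((i : Int) + di).toNat ((j : Int) + dj).toNat = 1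
          then false else safe) safe) true) = true then (1 : Int) else 0)
    (List.range board.length) ?percell
  case percell =>
    intro j hj
    rw [List.mem_range] at hj
    beta_reduce
    by_cases hd : Danger board board.length i j
    · rw [if_pos ((marked_iff board hpre hi hj).mpr hd),
        if_neg (by rw [safe_iff board board.length i j]; exact fun h => h hd)]
      norm_num
    · rw [if_neg (fun h => hd ((marked_iff board hpre hi hj).mp h)),
        if_pos ((safe_iff board board.length i j).mpr hd)]
      norm_num
  simpa using inner
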